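-- pv_equiv track=rewrite | github.com/Mac-Nerd/headphones | headphones/helpers.py | multikeysort
-- ===== SOURCE A (Python) =====
-- from functools import cmp_to_key
-- from operator import itemgetter
--
-- def cmp(x, y):
--     """
--     Replacement for built-in function cmp that was removed in Python 3
--
--     Compare the two objects x and y and return an integer according to
--     the outcome. The return value is negative if x < y, zero if x == y
--     and strictly positive if x > y.
--
--     https://portingguide.readthedocs.io/en/latest/comparisons.html#the-cmp-function
--     """
--     if x is None and y is None:
--         return 0
--     elif x is None:
--         return -1
--     elif y is None:
--         return 1
--     else:
--         return (x > y) - (x < y)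
--
-- def multikeysort(items, columns):
--     comparers = [
--         ((itemgetter(col[1:].strip()), -1) if col.startswith('-') else (itemgetter(col.strip()), 1))
--         for col in columns]
--
--     def comparer(left, right):
--         for fn, mult in comparers:
--             result = cmp(fn(left), fn(right))
--             if result:
--                 return mult * result
--         else:
--             return 0
--
--     return sorted(items, key=cmp_to_key(comparer))
-- ===== SOURCE B (Python) =====
-- def multikeysort(items, columns):
--     comparers = [
--         ((col[1:].strip(), True) if col.startswith('-') else (col.strip(), False))
--         for col in columns]
--     result = list(items)
--     for key, desc in reversed(comparers):
--         result.sort(key=lambda r, key=key: (r.get(key) is not None, r.get(key)), reverse=desc)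
--     return result
-- ===== Notes on version B (the rewrite author's own statement) =====
-- stated objective: idiomatic
-- what changed: A does one sort with a cmp_to_key lexicographic comparator over all columns; B instead runs one stable keyed sort per column in reverse column order (key = (value is not None, value) via dict.get, reverse=desc), relying on sort stability for the multi-column tie-break; Pre_ excludes missing-key inputs on which whether A raises KeyError or returns depends on which pairs Timsort happens to compare.
import Mathlib
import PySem

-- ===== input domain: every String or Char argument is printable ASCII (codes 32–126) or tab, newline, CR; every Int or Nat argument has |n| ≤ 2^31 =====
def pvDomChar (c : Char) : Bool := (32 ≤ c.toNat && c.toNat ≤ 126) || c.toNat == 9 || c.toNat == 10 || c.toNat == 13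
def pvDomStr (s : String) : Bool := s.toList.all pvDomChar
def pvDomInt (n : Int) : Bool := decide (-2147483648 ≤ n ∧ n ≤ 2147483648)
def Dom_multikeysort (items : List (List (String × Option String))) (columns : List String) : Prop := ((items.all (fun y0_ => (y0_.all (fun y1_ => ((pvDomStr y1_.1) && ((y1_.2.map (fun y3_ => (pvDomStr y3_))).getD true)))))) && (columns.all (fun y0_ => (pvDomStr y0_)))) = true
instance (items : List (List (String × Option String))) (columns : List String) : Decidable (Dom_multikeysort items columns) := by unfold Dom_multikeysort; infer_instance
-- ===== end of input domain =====

-- B replaces A's single sort with a lexicographic comparator by one stable keyed sort per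
-- column, least-significant first (reverse=desc), relying on sort stability (objective: idiomatic).

-- ===== PORT A =====

-- d[k] (itemgetter): first-match lookup; total form with default none, exact under Pre_
-- (where A never evaluates a missing key)
def pvGetItem (item : List (String × Option String)) (k : String) : Option String :=
  PySem.Dict.getD (PySem.Dict.mk item) k none

-- (x > y) - (x < y) on strings (Python's str comparison IS Lean's < on String, per PYSEM.md)
def pvCmpStr (a b : String) : Int := (if a > b then (1:Int) else 0) - (if a < b then (1:Int) else 0)

-- A's helper cmp (None checks, then (x > y) - (x < y))
def pvCmp (x y : Option String) : Int :=
  match x, y with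
  | none, none => 0
  | none, some _ => -1
  | some _, none => 1
  | some a, some b => pvCmpStr a b

-- the comparers list comprehension: (itemgetter(key), mult) stored as (key, mult)
def pvComparers (columns : List String) : List (String × Int) :=
  columns.map (fun col =>
    if PySem.Str.startswith col "-" then (PySem.Str.strip (PySem.Str.slice col (some 1) none), -1)
    else (PySem.Str.strip col, 1))

-- the inner function comparer: first non-zero cmp, scaled by mult, else 0
def pvComparer (cs : List (String × Int)) (left right : List (String × Option String)) : Int :=
  match cs with
  | [] => 0
  | (k, mult) :: rest =>
    let result := pvCmp (pvGetItem left k) (pvGetItem right k)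
    if result ≠ 0 then mult * result else pvComparer rest left right

-- Python's stable sort (sorted / list.sort) by a comparator, modelled as the stable
-- insertion sort: each element is placed before the first earlier-processed element it
-- does not compare strictly after (exact for stable sorting by a total preorder).
def pvInsert {α : Type} (c : α → α → Int) (x : α) : List α → List α
  | [] => [x]
  | y :: ys => if c x y ≤ 0 then x :: y :: ys else y :: pvInsert c x ys

def pvIsort {α : Type} (c : α → α → Int) (l : List α) : List α := l.foldr (pvInsert c) []

def multikeysort (items : List (List (String × Option String))) (columns : List String) : List (List (String × Option String)) :=
  pvIsort (pvComparer (pvComparers columns)) items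

-- ===== PORT B =====

-- B's comparers: (key, descending?) per column
def pvComparersB (columns : List String) : List (String × Bool) :=
  columns.map (fun col =>
    if PySem.Str.startswith col "-" then (PySem.Str.strip (PySem.Str.slice col (some 1) none), true)
    else (PySem.Str.strip col, false))

-- the sort key lambda: (r.get(key) is not None, r.get(key))
def pvKeyB (k : String) (r : List (String × Option String)) : Bool × Option String :=
  ((pvGetItem r k).isSome, pvGetItem r k)

-- Python tuple comparison of two keys: Bool component first (False < True), the Option
-- components are only compared when the Bools agree, i.e. both none (equal) or both some
def pvBoolCmp (a b : Bool) : Int := (if b < a then (1:Int) else 0) - (if a < b then (1:Int) else 0)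

def pvTupCmp (a b : Bool × Option String) : Int :=
  let f := pvBoolCmp a.1 b.1
  if f ≠ 0 then f
  else match a.2, b.2 with
    | some x, some y => pvCmpStr x y
    | _, _ => 0

-- result.sort(key=…, reverse=rev): stable; reverse=True is the same stable sort with
-- every key comparison reversed
def pvSortKeyRev (key : List (String × Option String) → Bool × Option String) (rev : Bool)
    (l : List (List (String × Option String))) : List (List (String × Option String)) :=
  pvIsort (fun x y => if rev then pvTupCmp (key y) (key x) else pvTupCmp (key x) (key y)) l

def multikeysort_alt (items : List (List (String × Option String))) (columns : List String) : List (List (String × Option String)) :=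
  (pvComparersB columns).reverse.foldl (fun acc kd => pvSortKeyRev (pvKeyB kd.1) kd.2 acc) items

-- ===== PRECONDITION & SPEC =====

def pvColKey (col : String) : String :=
  if PySem.Str.startswith col "-" then PySem.Str.strip (PySem.Str.slice col (some 1) none)
  else PySem.Str.strip col

-- every key of cols is present in every item
def pvAllPresent (items : List (List (String × Option String))) (cols : List String) : Prop :=
  ∀ col ∈ cols, ∀ item ∈ items, (PySem.Dict.get? (PySem.Dict.mk item) (pvColKey col)).isSome = true

-- the tuples of values of cols are pairwise distinct across items (cols separates all items)
def pvSeparates (items : List (List (String × Option String))) (cols : List String) : Prop :=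
  (items.map (fun item => cols.map (fun col => pvGetItem item (pvColKey col)))).Nodup

-- Pre_ excludes inputs on which some column key is missing from some item AND no fully
-- present prefix of the columns separates all items: on those, whether A raises KeyError
-- or returns depends on which pairs Timsort happens to compare (an accident of the sort's
-- comparison schedule, which no caller would rely on); everywhere a comparison is decided
-- before any missing key is touched — ≤ 1 item, all keys present, or a present column
-- prefix with no ties — the input is admitted and equality is proved.
def Pre_multikeysort (items : List (List (String × Option String))) (columns : List String) : Prop :=
  items.length ≤ 1 ∨ pvAllPresent items columns ∨
    ∃ n ∈ List.range (columns.length + 1),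
      pvAllPresent items (columns.take n) ∧ pvSeparates items (columns.take n)

instance (items : List (List (String × Option String))) (columns : List String) : Decidable (Pre_multikeysort items columns) := by
  unfold Pre_multikeysort pvAllPresent pvSeparates; infer_instance

def pvWitness_multikeysort : (List (List (String × Option String))) × List String :=
  ([[("a", some "x"), ("b", none)], [("a", none), ("b", some "y")]], ["a", "-b"])

def Spec_multikeysort (items : List (List (String × Option String))) (columns : List String) (out : List (List (String × Option String))) : Prop := out = multikeysort_alt items columns
instance (items : List (List (String × Option String))) (columns : List String) (out : List (List (String × Option String))) : Decidable (Spec_multikeysort items columns out) := by unfold Spec_multikeysort; infer_instance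

-- ===== CLAIM (what is proved, stated in full; the proofs are below) =====
def Claim_equal_multikeysort : Prop := ∀ (items : List (List (String × Option String))) (columns : List String), Dom_multikeysort items columns → Pre_multikeysort items columns → Spec_multikeysort items columns (multikeysort items columns)


-- ===== LEMMAS AND PROOFS =====

-- a comparator arising from a total preorder: sign-antisymmetric and transitive
def PvAnti {α : Type} (c : α → α → Int) : Prop := ∀ x y, c x y = -(c y x)
def PvTrans {α : Type} (c : α → α → Int) : Prop := ∀ x y z, c x y ≤ 0 → c y z ≤ 0 → c x z ≤ 0

lemma pvTrans_le_lt {α : Type} {c : α → α → Int} (ha : PvAnti c) (ht : PvTrans c)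
    {x y z : α} (h1 : c x y ≤ 0) (h2 : c y z < 0) : c x z < 0 := by
  by_contra h
  have hzx : c z x ≤ 0 := by have := ha x z; omega
  have hzy : c z y ≤ 0 := ht z x y hzx h1
  have := ha y z
  omega


lemma pvTrans_lt_le {α : Type} {c : α → α → Int} (ha : PvAnti c) (ht : PvTrans c)
    {x y z : α} (h1 : c x y < 0) (h2 : c y z ≤ 0) : c x z < 0 := by
  by_contra h
  have hzx : c z x ≤ 0 := by have := ha x z; omega
  have hyx : c y x ≤ 0 := ht y z x h2 hzx
  have := ha x y
  omega


-- lexicographic combination of comparators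
def pvLex {α : Type} (c d : α → α → Int) (x y : α) : Int := if c x y ≠ 0 then c x y else d x y

def pvLexList {α : Type} : List (α → α → Int) → α → α → Int
  | [] => fun _ _ => 0
  | c :: cs => pvLex c (pvLexList cs)

lemma pvLex_anti {α : Type} {c d : α → α → Int} (hc : PvAnti c) (hd : PvAnti d) : PvAnti (pvLex c d) := by
  intro x y
  unfold pvLex
  have h1 := hc x y
  have h2 := hd x y
  split_ifs with ha hb hb <;> omega


lemma pvLex_trans {α : Type} {c d : α → α → Int} (hca : PvAnti c) (hct : PvTrans c)
    (_hda : PvAnti d) (hdt : PvTrans d) : PvTrans (pvLex c d) := by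
  intro x y z hxy hyz
  have hx1 : c x y ≤ 0 := by unfold pvLex at hxy; split_ifs at hxy with h; exacts [hxy, by omega]
  have hy1 : c y z ≤ 0 := by unfold pvLex at hyz; split_ifs at hyz with h; exacts [hyz, by omega]
  unfold pvLex
  split_ifs with h3
  · exact hct x y z hx1 hy1
  · by_cases h1 : c x y = 0
    · by_cases h2 : c y z = 0
      · have hdx : d x y ≤ 0 := by unfold pvLex at hxy; simpa [h1] using hxy
        have hdy : d y z ≤ 0 := by unfold pvLex at hyz; simpa [h2] using hyz
        exact hdt x y z hdx hdy
      · have := pvTrans_le_lt hca hct hx1 (lt_of_le_of_ne hy1 h2)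
        omega
    · have := pvTrans_lt_le hca hct (lt_of_le_of_ne hx1 h1) hy1
      omega


lemma mem_pvInsert {α : Type} {c : α → α → Int} {x z : α} {n : List α} :
    z ∈ pvInsert c x n ↔ z = x ∨ z ∈ n := by
  induction n with
  | nil => simp [pvInsert]
  | cons y ys ih =>
    simp only [pvInsert]
    split_ifs <;> simp [ih] <;> tauto


lemma mem_pvIsort {α : Type} {c : α → α → Int} {z : α} {l : List α} :
    z ∈ pvIsort c l ↔ z ∈ l := by
  induction l with
  | nil => simp [pvIsort]
  | cons x xs ih => simp [pvIsort, mem_pvInsert] at *; tauto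


lemma pairwise_pvInsert {α : Type} {c : α → α → Int} (ha : PvAnti c) (ht : PvTrans c)
    (x : α) {n : List α} (h : n.Pairwise (fun a b => c a b ≤ 0)) :
    (pvInsert c x n).Pairwise (fun a b => c a b ≤ 0) := by
  induction n with
  | nil => simp [pvInsert]
  | cons y ys ih =>
    rcases List.pairwise_cons.mp h with ⟨hy, hys⟩
    simp only [pvInsert]
    split_ifs with hxy
    · refine List.pairwise_cons.mpr ⟨?_, h⟩
      intro z hz
      rcases List.mem_cons.mp hz with rfl | hz'
      · exact hxy
      · exact ht x y z hxy (hy z hz')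
    · refine List.pairwise_cons.mpr ⟨?_, ih hys⟩
      intro z hz
      rcases mem_pvInsert.mp hz with hzx | hz
      · rw [hzx]; have := ha x y; omega
      · exact hy z hz


lemma pvIsort_pairwise {α : Type} {c : α → α → Int} (ha : PvAnti c) (ht : PvTrans c)
    (l : List α) : (pvIsort c l).Pairwise (fun a b => c a b ≤ 0) := by
  induction l with
  | nil => simp [pvIsort]
  | cons x xs ih => exact pairwise_pvInsert ha ht x ih


lemma pvInsert_congr {α : Type} {c c' : α → α → Int} {x : α} {n : List α}
    (h : ∀ z ∈ n, (c x z ≤ 0 ↔ c' x z ≤ 0)) : pvInsert c x n = pvInsert c' x n := by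
  induction n with
  | nil => rfl
  | cons y ys ih =>
    simp only [pvInsert]
    have hy := h y (by simp)
    split_ifs with h1 h2 h2
    · rfl
    · exact absurd (hy.mp h1) h2
    · exact absurd (hy.mpr h2) h1
    · rw [ih (fun z hz => h z (by simp [hz]))]


-- inserting y by c and x by (pvLex c d) commute when d orders x strictly after y
lemma pvInsert_comm {α : Type} {c d : α → α → Int} (hca : PvAnti c) (hct : PvTrans c)
    (_hda : PvAnti d) {x y : α} (hxy : 0 < d x y) (n : List α) :
    pvInsert c y (pvInsert (pvLex c d) x n) = pvInsert (pvLex c d) x (pvInsert c y n) := by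
  have h1 : 0 < pvLex c d x y ↔ c y x ≤ 0 := by
    unfold pvLex
    have := hca x y
    split_ifs with h <;> omega
  have hLle : ∀ u v : α, c u v < 0 → pvLex c d u v ≤ 0 := by
    intro u v h
    unfold pvLex
    split_ifs <;> omega
  have hLc : ∀ u v : α, pvLex c d u v ≤ 0 → c u v ≤ 0 := by
    intro u v h
    unfold pvLex at h
    split_ifs at h <;> omega
  induction n with
  | nil =>
    simp only [pvInsert]
    by_cases hyx : c y x ≤ 0
    · rw [if_pos hyx, if_neg (by have := h1.mpr hyx; omega)]
    · rw [if_neg hyx, if_pos (by by_contra hL; have := h1.mp (by omega); omega)]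
  | cons z n' ih =>
    simp only [pvInsert]
    by_cases hyz : c y z ≤ 0 <;> by_cases hxz : pvLex c d x z ≤ 0
    · -- both stop at z
      rw [if_pos hxz, if_pos hyz]
      simp only [pvInsert]
      by_cases hyx : c y x ≤ 0
      · rw [if_pos hyx, if_neg (by have := h1.mpr hyx; omega), if_pos hxz]
      · rw [if_neg hyx, if_pos hyz, if_pos (by by_contra hL; have := h1.mp (by omega); omega)]
    · -- y stops at z, x passes z
      have hyx : c y x ≤ 0 := by
        by_contra hyx
        have hxy2 : c x y < 0 := by have := hca x y; omega
        have : c x z < 0 := pvTrans_lt_le hca hct hxy2 hyz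
        exact hxz (hLle x z this)
      rw [if_neg hxz, if_pos hyz]
      simp only [pvInsert]
      rw [if_pos hyz, if_neg (by have := h1.mpr hyx; omega), if_neg hxz]
    · -- x stops at z, y passes z
      have hyx : ¬ c y x ≤ 0 := by
        intro hyx
        exact hyz (hct y x z hyx (hLc x z hxz))
      rw [if_pos hxz, if_neg hyz]
      simp only [pvInsert]
      rw [if_neg hyx, if_neg hyz, if_pos hxz]
    · -- both pass z
      rw [if_neg hxz, if_neg hyz]
      simp only [pvInsert]
      rw [if_neg hyz, if_neg hxz, ih]


-- the key stability lemma: re-sorting by c after a d-insertion is a (pvLex c d)-insertion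
lemma pvIsort_pvInsert {α : Type} {c d : α → α → Int} (hca : PvAnti c) (hct : PvTrans c)
    (hda : PvAnti d) (hdt : PvTrans d) (x : α) {m : List α}
    (hm : m.Pairwise (fun a b => d a b ≤ 0)) :
    pvIsort c (pvInsert d x m) = pvInsert (pvLex c d) x (pvIsort c m) := by
  induction m with
  | nil => rfl
  | cons y m' ih =>
    rcases List.pairwise_cons.mp hm with ⟨hy, hm'⟩
    simp only [pvInsert]
    split_ifs with hdxy
    · -- x :: y :: m' : inserting x by c equals inserting it by pvLex c d here
      have hall : ∀ z ∈ pvIsort c (y :: m'), c x z ≤ 0 ↔ pvLex c d x z ≤ 0 := by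
        intro z hz
        have hdz : d x z ≤ 0 := by
          rcases List.mem_cons.mp (mem_pvIsort.mp hz) with rfl | hz'
          · exact hdxy
          · exact hdt x y z hdxy (hy z hz')
        unfold pvLex
        split_ifs with h <;> omega
      show pvInsert c x (pvIsort c (y :: m')) = _
      exact pvInsert_congr hall
    · -- y :: pvInsert d x m'
      show pvInsert c y (pvIsort c (pvInsert d x m')) = _
      rw [ih hm']
      exact pvInsert_comm hca hct hda (by omega) _


lemma pvIsort_pvLex {α : Type} {c d : α → α → Int} (hca : PvAnti c) (hct : PvTrans c)
    (hda : PvAnti d) (hdt : PvTrans d) (l : List α) :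
    pvIsort (pvLex c d) l = pvIsort c (pvIsort d l) := by
  induction l with
  | nil => rfl
  | cons x l ih =>
    show pvInsert (pvLex c d) x (pvIsort (pvLex c d) l) = pvIsort c (pvInsert d x (pvIsort d l))
    rw [ih, pvIsort_pvInsert hca hct hda hdt x (pvIsort_pairwise hda hdt l)]


lemma pvLexList_anti_trans {α : Type} {cs : List (α → α → Int)}
    (h : ∀ c ∈ cs, PvAnti c ∧ PvTrans c) : PvAnti (pvLexList cs) ∧ PvTrans (pvLexList cs) := by
  induction cs with
  | nil =>
    constructor
    · intro x y; simp [pvLexList]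
    · intro x y z h1 h2; simp [pvLexList]
  | cons c cs ih =>
    rcases h c (by simp) with ⟨hca, hct⟩
    rcases ih (fun c hc => h c (List.mem_cons_of_mem _ hc)) with ⟨ha, ht⟩
    exact ⟨pvLex_anti hca ha, pvLex_trans hca hct ha ht⟩


lemma pvIsort_zero {α : Type} (l : List α) : pvIsort (fun _ _ => (0:Int)) l = l := by
  induction l with
  | nil => rfl
  | cons x l ih =>
    show pvInsert (fun _ _ => (0:Int)) x (pvIsort (fun _ _ => (0:Int)) l) = x :: l
    rw [ih]
    cases l <;> simp [pvInsert]


-- a single stable sort by the lexicographic comparator = one stable sort per component,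
-- least-significant component first
lemma pvIsort_pvLexList {α : Type} {cs : List (α → α → Int)}
    (h : ∀ c ∈ cs, PvAnti c ∧ PvTrans c) (l : List α) :
    pvIsort (pvLexList cs) l = cs.foldr (fun c acc => pvIsort c acc) l := by
  induction cs with
  | nil => simpa [pvLexList] using pvIsort_zero l
  | cons c cs ih =>
    rcases h c (by simp) with ⟨hca, hct⟩
    rcases pvLexList_anti_trans (fun c hc => h c (List.mem_cons_of_mem _ hc)) with ⟨ha, ht⟩
    show pvIsort (pvLex c (pvLexList cs)) l = _
    rw [pvIsort_pvLex hca hct ha ht, ih (fun c hc => h c (List.mem_cons_of_mem _ hc))]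
    rfl


-- concrete comparator facts
lemma pvCmpStr_le_iff {a b : String} : pvCmpStr a b ≤ 0 ↔ a ≤ b := by
  unfold pvCmpStr
  rcases lt_trichotomy a b with h | rfl | h
  · simp [h, lt_asymm h, le_of_lt h]
  · simp
  · simp [h, lt_asymm h, not_le.mpr h]


lemma pvCmp_anti : PvAnti pvCmp := by
  have hstr : ∀ a b : String, pvCmpStr a b = -(pvCmpStr b a) := by
    intro a b
    unfold pvCmpStr
    simp only [gt_iff_lt]
    ring
  intro x y
  cases x <;> cases y <;> simp [pvCmp]
  exact hstr _ _


lemma pvCmp_trans : PvTrans pvCmp := by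
  intro x y z h1 h2
  cases x <;> cases y <;> cases z <;> simp [pvCmp, pvCmpStr_le_iff] at h1 h2 ⊢
  exact le_trans h1 h2


-- the per-column comparator of A
def pvColCmp (p : String × Int) (x y : List (String × Option String)) : Int :=
  p.2 * pvCmp (pvGetItem x p.1) (pvGetItem y p.1)

lemma pvColCmp_anti_trans (p : String × Int) (hp : p.2 = 1 ∨ p.2 = -1) :
    PvAnti (pvColCmp p) ∧ PvTrans (pvColCmp p) := by
  obtain ⟨k, m⟩ := p
  simp only at hp
  constructor
  · intro x y
    have := pvCmp_anti (pvGetItem x k) (pvGetItem y k)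
    simp only [pvColCmp]
    rcases hp with rfl | rfl <;> omega
  · intro x y z h1 h2
    simp only [pvColCmp] at h1 h2 ⊢
    rcases hp with rfl | rfl
    · simp only [one_mul] at h1 h2 ⊢
      exact pvCmp_trans _ _ _ h1 h2
    · have haxy := pvCmp_anti (pvGetItem x k) (pvGetItem y k)
      have hayz := pvCmp_anti (pvGetItem y k) (pvGetItem z k)
      have haxz := pvCmp_anti (pvGetItem x k) (pvGetItem z k)
      have := pvCmp_trans (pvGetItem z k) (pvGetItem y k) (pvGetItem x k) (by omega) (by omega)
      omega


lemma pvComparer_eq (cs : List (String × Int)) (h : ∀ p ∈ cs, p.2 = 1 ∨ p.2 = -1)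
    (x y : List (String × Option String)) :
    pvComparer cs x y = pvLexList (cs.map pvColCmp) x y := by
  induction cs with
  | nil => rfl
  | cons p rest ih =>
    obtain ⟨k, m⟩ := p
    rcases h (k, m) (by simp) with hm | hm <;>
      subst hm <;>
      by_cases hr : pvCmp (pvGetItem x k) (pvGetItem y k) = 0 <;>
      simp [pvComparer, pvLexList, pvLex, pvColCmp, hr,
        ih (fun p hp => h p (List.mem_cons_of_mem _ hp))]


lemma pvComparers_mult (columns : List String) : ∀ p ∈ pvComparers columns, p.2 = 1 ∨ p.2 = -1 := by
  intro p hp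
  unfold pvComparers at hp
  simp only [List.mem_map] at hp
  rcases hp with ⟨col, _, hp⟩
  split_ifs at hp <;> simp [← hp]


lemma pvTupCmp_eq (k : String) (x y : List (String × Option String)) :
    pvTupCmp (pvKeyB k x) (pvKeyB k y) = pvCmp (pvGetItem x k) (pvGetItem y k) := by
  cases hx : pvGetItem x k <;> cases hy : pvGetItem y k <;>
    simp [pvTupCmp, pvKeyB, pvBoolCmp, pvCmp, hx, hy] <;> decide


lemma pvSortKeyRev_eq (k : String) (d : Bool) (l : List (List (String × Option String))) :
    pvSortKeyRev (pvKeyB k) d l = pvIsort (pvColCmp (k, if d then -1 else 1)) l := by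
  unfold pvSortKeyRev
  congr 1
  funext x y
  cases d
  · simp [pvTupCmp_eq, pvColCmp]
  · simp only [if_true]
    rw [pvTupCmp_eq]
    have := pvCmp_anti (pvGetItem x k) (pvGetItem y k)
    simp [pvColCmp]
    omega


lemma pvAlt_foldr (columns : List String) (l : List (List (String × Option String))) :
    (pvComparersB columns).foldr (fun kd acc => pvSortKeyRev (pvKeyB kd.1) kd.2 acc) l
      = ((pvComparers columns).map pvColCmp).foldr (fun c acc => pvIsort c acc) l := by
  induction columns generalizing l with
  | nil => rfl
  | cons col rest ih =>
    have hA : pvComparers (col :: rest)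
        = (if PySem.Str.startswith col "-" = true
            then (PySem.Str.strip (PySem.Str.slice col (some 1) none), (-1:Int))
            else (PySem.Str.strip col, 1)) :: pvComparers rest := rfl
    have hB : pvComparersB (col :: rest)
        = (if PySem.Str.startswith col "-" = true
            then (PySem.Str.strip (PySem.Str.slice col (some 1) none), true)
            else (PySem.Str.strip col, false)) :: pvComparersB rest := rfl
    rw [hB, hA, List.map_cons, List.foldr_cons, List.foldr_cons, ih, pvSortKeyRev_eq]
    by_cases hs : PySem.Chars.startswith col.toList ['-'] = true <;> simp [hs]


-- ===== VERDICT (by name: the statement is the Claim_ definition above) =====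
theorem multikeysort_spec : Claim_equal_multikeysort := by
  intro items columns _ _
  unfold Spec_multikeysort multikeysort multikeysort_alt
  rw [List.foldl_reverse, pvAlt_foldr]
  have hmul := pvComparers_mult columns
  have hval : ∀ c ∈ (pvComparers columns).map pvColCmp, PvAnti c ∧ PvTrans c := by
    intro c hc
    rcases List.mem_map.mp hc with ⟨p, hp, rfl⟩
    exact pvColCmp_anti_trans p (hmul p hp)
  rw [← pvIsort_pvLexList hval]
  congr 1
  funext x y
  exact pvComparer_eq _ hmul x y
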